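-- pv_equiv track=rewrite | github.com/spaceorc/andgein-contest-2026 | brainfuck/brainfuck.py | build_from
-- ===== SOURCE A (Python) =====
-- def build_from(s: str, start_value: int = 0) -> str:
--     """Build string output starting from a given accumulator value."""
--     result = []
--     current = start_value
--     at_cell1 = False
--     for ch in s:
--         target = ord(ch)
--         diff = target - current
--
--         # Calculate cost of adjusting vs rebuilding
--         adjust_cost = abs(diff) + (1 if not at_cell1 else 0)  # +1 for '>' if needed
--
--         # Find best multiplication for rebuild
--         best = (target + 10, target, 1)  # (cost, a, b)
--         for a in range(1, 25):
--             for b in range(1, 25):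
--                 rem = target - a * b
--                 cost = a + b + 6 + abs(rem)  # [>...<-]> = 6 overhead + a + b + rem
--                 if cost < best[0]:
--                     best = (cost, a, b)
--         rebuild_cost = best[0] + (4 if at_cell1 else 0)  # +4 for [-]< if needed
--
--         if adjust_cost <= rebuild_cost:
--             # Adjust cell 1
--             if not at_cell1:
--                 result.append('>')
--                 at_cell1 = True
--             result.append('+' * diff if diff > 0 else '-' * -diff)
--         else:
--             # Rebuild using multiplication
--             _, a, b = best
--             rem = target - a * b
--             if at_cell1:
--                 result.append('[-]<')  # clear cell 1, go to cell 0
--             result.append('+' * a)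
--             result.append('[>' + '+' * b + '<-]>')  # multiply, end at cell 1
--             at_cell1 = True
--             result.append('+' * rem if rem > 0 else '-' * -rem)
--         current = target
--         result.append('.')
--     # Return pointer to cell 0
--     if at_cell1:
--         result.append('<')
--     return ''.join(result)
-- ===== SOURCE B (Python) =====
-- def build_from(s: str, start_value: int = 0) -> str:
--     """Build string output starting from a given accumulator value."""
--     def best(t):
--         # Divisor-guided search: for fixed a, the cost a+b+6+|t-a*b| is piecewise
--         # linear in b (slope 1-a for b <= t//a, slope 1+a above), so its minimum
--         # over b in 1..24 -- with smallest-b tie-breaking -- is attained at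
--         # b in {1, t//a, t//a + 1} clamped to [1, 24].  72 candidates replace 576.
--         cands = []
--         for a in range(1, 25):
--             q = t // a
--             for b0 in (1, q, q + 1):
--                 b = min(24, max(1, b0))
--                 cands.append((a + b + 6 + abs(t - a * b), a, b))
--         m = min(cands)
--         return m if m[0] < t + 10 else (t + 10, t, 1)
--
--     # The generation state is redundant: the accumulator before character i is
--     # ord(s[i-1]) (start_value for i == 0) and the pointer sits at cell 1 for
--     # every character after the first, so each piece is computed independently.
--     def piece(t, cur, first):
--         cost, a, b = best(t)
--         d = t - cur
--         if abs(d) + (1 if first else 0) <= cost + (0 if first else 4):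
--             return ('>' if first else '') + ('+' if d > 0 else '-') * abs(d) + '.'
--         rem = t - a * b
--         return (('' if first else '[-]<') + '+' * a + '[>' + '+' * b + '<-]>'
--                 + ('+' if rem > 0 else '-') * abs(rem) + '.')
--
--     if not s:
--         return ''
--     out = [piece(ord(s[0]), start_value, True)]
--     out += [piece(ord(y), ord(x), False) for x, y in zip(s, s[1:])]
--     return ''.join(out) + '<'
-- ===== Notes on version B (the rewrite author's own statement) =====
-- stated objective: faster
-- what changed: The exhaustive 24x24 multiplication search is replaced by a divisor-guided search (for each a only b in {1, t//a, t//a+1} clamped, justified by piecewise linearity of the cost in b), and the stateful result/current/at_cell1 loop is replaced by stateless per-character pieces (accumulator before character i is ord(s[i-1]), pointer is at cell 1 after the first character) joined in one pass.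
import Mathlib
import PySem

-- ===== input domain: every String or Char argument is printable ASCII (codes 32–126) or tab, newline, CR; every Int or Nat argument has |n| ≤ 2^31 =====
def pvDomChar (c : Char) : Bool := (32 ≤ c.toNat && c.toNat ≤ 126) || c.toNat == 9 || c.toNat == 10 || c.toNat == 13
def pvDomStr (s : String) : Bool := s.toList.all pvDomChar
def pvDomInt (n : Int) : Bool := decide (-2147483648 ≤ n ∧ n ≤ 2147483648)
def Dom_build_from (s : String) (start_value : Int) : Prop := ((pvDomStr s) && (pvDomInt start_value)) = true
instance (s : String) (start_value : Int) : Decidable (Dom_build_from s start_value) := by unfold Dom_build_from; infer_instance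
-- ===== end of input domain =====

-- B replaces A's exhaustive 24×24 multiplication search by a divisor-guided one (per a only b ∈ {1, t//a, t//a+1}
-- clamped) and emits the program as stateless per-character pieces (the accumulator before a character is the
-- previous character's code); objective: faster by a constant factor (72 candidates instead of 576 per character).

-- ===== PORT A =====
-- the inner 24×24 search of A, verbatim (seed (target+10, target, 1), strict-< update, lexicographic scan order)
def pvABest (target : Int) : Int × Int × Int :=
  (PySem.List.pyRange 1 25).foldl (fun best a =>
    (PySem.List.pyRange 1 25).foldl (fun best b =>
      let rem := target - a * b
      let cost := a + b + 6 + |rem|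
      if cost < best.1 then (cost, a, b) else best) best)
    (target + 10, target, 1)

-- one iteration of A's 'for ch in s' loop; state = (result, current, at_cell1)
def pvAStep (st : List (List Char) × Int × Bool) (ch : Char) : List (List Char) × Int × Bool :=
  let result := st.1
  let current := st.2.1
  let at1 := st.2.2
  let target : Int := (ch.toNat : Int)
  let diff := target - current
  let adjust_cost : Int := |diff| + (if !at1 then 1 else 0)
  let best := pvABest target
  let rebuild_cost := best.1 + (if at1 then 4 else 0)
  let res' :=
    if adjust_cost ≤ rebuild_cost then
      let r1 := if !at1 then result ++ [['>']] else result
      r1 ++ [if diff > 0 then List.replicate diff.toNat '+' else List.replicate (-diff).toNat '-']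
    else
      let a := best.2.1
      let b := best.2.2
      let rem := target - a * b
      let r1 := if at1 then result ++ [['[', '-', ']', '<']] else result
      let r2 := r1 ++ [List.replicate a.toNat '+']
      let r3 := r2 ++ [['[', '>'] ++ List.replicate b.toNat '+' ++ ['<', '-', ']', '>']]
      r3 ++ [if rem > 0 then List.replicate rem.toNat '+' else List.replicate (-rem).toNat '-']
  (res' ++ [['.']], target, true)

def build_from (s : String) (start_value : Int) : String :=
  let fin := s.toList.foldl pvAStep ([], start_value, false)
  let res := if fin.2.2 then fin.1 ++ [['<']] else fin.1
  String.mk (PySem.Chars.join [] res)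

-- ===== PORT B =====
-- Python tuple comparison (lexicographic strict <) on (cost, a, b), as builtin min uses it
def pvLex3Lt (x y : Int × Int × Int) : Bool :=
  x.1 < y.1 || (x.1 == y.1 && (x.2.1 < y.2.1 || (x.2.1 == y.2.1 && x.2.2 < y.2.2)))

-- the 72 candidates of best(t): per a, b0 in (1, t//a, t//a+1), clamped to [1,24]
def pvCandsB (t : Int) : List (Int × Int × Int) :=
  (PySem.List.pyRange 1 25).flatMap (fun a =>
    let q := PySem.Int.floordiv t a
    [1, q, q + 1].map (fun b0 =>
      let b := min 24 (max 1 b0)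
      (a + b + 6 + |t - a * b|, a, b)))

-- best(t) of Source B: min(cands) (first of equals, Python tuple order), then the seed comparison
def pvBestB (t : Int) : Int × Int × Int :=
  match pvCandsB t with
  | [] => (t + 10, t, 1)  -- unreachable totality branch: pvCandsB is never empty
  | h :: rest =>
    let m := rest.foldl (fun m y => if pvLex3Lt y m then y else m) h
    if m.1 < t + 10 then m else (t + 10, t, 1)

-- piece(t, cur, first) of Source B
def pvPiece (t cur : Int) (first : Bool) : List Char :=
  let best := pvBestB t
  let d := t - cur
  if |d| + (if first then 1 else 0) ≤ best.1 + (if first then 0 else 4) then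
    (if first then ['>'] else []) ++ List.replicate d.natAbs (if d > 0 then '+' else '-') ++ ['.']
  else
    let rem := t - best.2.1 * best.2.2
    (if first then [] else ['[', '-', ']', '<']) ++ List.replicate best.2.1.toNat '+' ++
      ['[', '>'] ++ List.replicate best.2.2.toNat '+' ++ ['<', '-', ']', '>'] ++
      List.replicate rem.natAbs (if rem > 0 then '+' else '-') ++ ['.']

def build_from_alt (s : String) (start_value : Int) : String :=
  match s.toList with
  | [] => ""
  | c :: rest =>
    let pieces := pvPiece (c.toNat : Int) start_value true ::
      ((c :: rest).zip rest).map (fun xy => pvPiece (xy.2.toNat : Int) (xy.1.toNat : Int) false)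
    String.mk (PySem.Chars.join [] pieces ++ ['<'])

-- ===== PRECONDITION & SPEC =====
def Spec_build_from (s : String) (start_value : Int) (out : String) : Prop := out = build_from_alt s start_value
instance (s : String) (start_value : Int) (out : String) : Decidable (Spec_build_from s start_value out) := by unfold Spec_build_from; infer_instance

-- ===== CLAIM (what is proved, stated in full; the proofs are below) =====
def Claim_equal_build_from : Prop := ∀ (s : String) (start_value : Int), Dom_build_from s start_value → Spec_build_from s start_value (build_from s start_value)

-- ===== LEMMAS AND PROOFS =====
set_option maxRecDepth 8192

-- ''.join on char-lists is concatenation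
theorem pv_join_nil_flatten (l : List (List Char)) : PySem.Chars.join [] l = l.flatten := by
  induction l with
  | nil => rfl
  | cons h t ih =>
    cases t with
    | nil => simp [PySem.Chars.join, List.intercalate]
    | cons h' t' =>
      simp only [PySem.Chars.join, List.intercalate, List.intersperse] at *
      simp_all

-- Python's '+'*d / '-'*(-d) as one replicate
theorem pv_rep (d : Int) (cp cm : Char) :
    (if d > 0 then List.replicate d.toNat cp else List.replicate (-d).toNat cm)
      = List.replicate d.natAbs (if d > 0 then cp else cm) := by
  split_ifs with h
  · rw [show d.toNat = d.natAbs from by omega]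
  · rw [show (-d).toNat = d.natAbs from by omega]

-- ---- the two searches agree: argmin machinery ----

-- A's full candidate list, in A's scan order
def pvCands (t : Int) : List (Int × Int × Int) :=
  (PySem.List.pyRange 1 25).flatMap (fun a =>
    (PySem.List.pyRange 1 25).map (fun b => (a + b + 6 + |t - a * b|, a, b)))

-- lexicographic ≤ on (cost, a, b)
def pvLe (x y : Int × Int × Int) : Prop :=
  x.1 < y.1 ∨ (x.1 = y.1 ∧ (x.2.1 < y.2.1 ∨ (x.2.1 = y.2.1 ∧ x.2.2 ≤ y.2.2)))

-- strict scan order of A's grid: (a, b) lexicographically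
def pvScan (x y : Int × Int × Int) : Prop :=
  x.2.1 < y.2.1 ∨ (x.2.1 = y.2.1 ∧ x.2.2 < y.2.2)

def pvFoldC (l : List (Int × Int × Int)) (x : Int × Int × Int) : Int × Int × Int :=
  l.foldl (fun m y => if y.1 < m.1 then y else m) x

def pvFoldL (l : List (Int × Int × Int)) (x : Int × Int × Int) : Int × Int × Int :=
  l.foldl (fun m y => if pvLex3Lt y m then y else m) x

theorem pvLe_refl (x : Int × Int × Int) : pvLe x x := by
  obtain ⟨x1, x2, x3⟩ := x; simp [pvLe]

theorem pvLe_mk {c1 a1 b1 c2 a2 b2 : Int}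
    (h : c1 < c2 ∨ (c1 = c2 ∧ (a1 < a2 ∨ (a1 = a2 ∧ b1 ≤ b2)))) :
    pvLe (c1, a1, b1) (c2, a2, b2) := h

theorem pvLe_trans {x y z : Int × Int × Int} (h1 : pvLe x y) (h2 : pvLe y z) : pvLe x z := by
  obtain ⟨x1, x2, x3⟩ := x; obtain ⟨y1, y2, y3⟩ := y; obtain ⟨z1, z2, z3⟩ := z
  simp only [pvLe] at *; omega

theorem pvLe_antisymm {x y : Int × Int × Int} (h1 : pvLe x y) (h2 : pvLe y x) : x = y := by
  obtain ⟨x1, x2, x3⟩ := x; obtain ⟨y1, y2, y3⟩ := y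
  simp only [pvLe, Prod.mk.injEq] at *; omega

theorem pvLex3Lt_false {x y : Int × Int × Int} (h : pvLex3Lt y x = false) : pvLe x y := by
  obtain ⟨x1, x2, x3⟩ := x; obtain ⟨y1, y2, y3⟩ := y
  simp only [pvLex3Lt, pvLe, Bool.or_eq_false_iff, Bool.and_eq_false_iff,
    decide_eq_false_iff_not, beq_eq_false_iff_ne] at *
  omega

theorem pvLex3Lt_true {x y : Int × Int × Int} (h : pvLex3Lt y x = true) : pvLe y x := by
  obtain ⟨x1, x2, x3⟩ := x; obtain ⟨y1, y2, y3⟩ := y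
  simp only [pvLex3Lt, pvLe, Bool.or_eq_true, Bool.and_eq_true,
    decide_eq_true_eq, beq_iff_eq] at *
  omega

theorem pvFoldC_mem (l : List (Int × Int × Int)) (x : Int × Int × Int) :
    pvFoldC l x ∈ x :: l := by
  induction l generalizing x with
  | nil => simp [pvFoldC]
  | cons y l ih =>
    have : pvFoldC (y :: l) x = pvFoldC l (if y.1 < x.1 then y else x) := rfl
    rw [this]
    have := ih (if y.1 < x.1 then y else x)
    rcases List.mem_cons.mp this with h | h
    · rw [h]; split_ifs <;> simp
    · simp [h]

theorem pvFoldL_mem (l : List (Int × Int × Int)) (x : Int × Int × Int) :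
    pvFoldL l x ∈ x :: l := by
  induction l generalizing x with
  | nil => simp [pvFoldL]
  | cons y l ih =>
    have : pvFoldL (y :: l) x = pvFoldL l (if pvLex3Lt y x then y else x) := rfl
    rw [this]
    have := ih (if pvLex3Lt y x then y else x)
    rcases List.mem_cons.mp this with h | h
    · rw [h]; split_ifs <;> simp
    · simp [h]

-- B's fold (first of lex-equals) is lex-least over its scan
theorem pvFoldL_le (l : List (Int × Int × Int)) (x : Int × Int × Int) :
    ∀ z ∈ x :: l, pvLe (pvFoldL l x) z := by
  induction l generalizing x with
  | nil =>
    intro z hz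
    simp only [List.mem_cons, List.not_mem_nil, or_false] at hz
    subst hz
    exact pvLe_refl _
  | cons y l ih =>
    intro z hz
    have hstep : pvFoldL (y :: l) x = pvFoldL l (if pvLex3Lt y x then y else x) := rfl
    have hkept : pvLe (pvFoldL (y :: l) x) (if pvLex3Lt y x then y else x) := by
      rw [hstep]; exact ih _ _ (by simp)
    have hdrop : pvLe (pvFoldL (y :: l) x) x ∧ pvLe (pvFoldL (y :: l) x) y := by
      by_cases hxy : pvLex3Lt y x = true
      · rw [hxy, if_pos rfl] at hkept
        exact ⟨pvLe_trans hkept (pvLex3Lt_true hxy), hkept⟩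
      · rw [Bool.not_eq_true] at hxy
        rw [if_neg (by simp [hxy])] at hkept
        exact ⟨hkept, pvLe_trans hkept (pvLex3Lt_false hxy)⟩
    rcases List.mem_cons.mp hz with h | h
    · subst h; exact hdrop.1
    rcases List.mem_cons.mp h with h | h
    · subst h; exact hdrop.2
    · rw [hstep]; exact ih _ z (by simp [h])

-- A's fold (first of minimal cost) is lex-least, provided the scan order refines the lex order
theorem pvFoldC_le (l : List (Int × Int × Int)) (x : Int × Int × Int)
    (hp : (x :: l).Pairwise pvScan) :
    ∀ z ∈ x :: l, pvLe (pvFoldC l x) z := by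
  induction l generalizing x with
  | nil =>
    intro z hz
    simp only [List.mem_cons, List.not_mem_nil, or_false] at hz
    subst hz
    exact pvLe_refl _
  | cons y l ih =>
    intro z hz
    have hstep : pvFoldC (y :: l) x = pvFoldC l (if y.1 < x.1 then y else x) := rfl
    have hp' : ((if y.1 < x.1 then y else x) :: l).Pairwise pvScan := by
      rcases List.pairwise_cons.mp hp with ⟨hx, hyl⟩
      rcases List.pairwise_cons.mp hyl with ⟨hy, hl⟩
      split_ifs
      · exact List.pairwise_cons.mpr ⟨hy, hl⟩
      · exact List.pairwise_cons.mpr ⟨fun z hz => hx z (by simp [hz]), hl⟩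
    have hkept : pvLe (pvFoldC (y :: l) x) (if y.1 < x.1 then y else x) := by
      rw [hstep]; exact ih _ hp' _ (by simp)
    have hxy : pvScan x y := (List.pairwise_cons.mp hp).1 y (by simp)
    have hdrop : pvLe (pvFoldC (y :: l) x) x ∧ pvLe (pvFoldC (y :: l) x) y := by
      by_cases hc : y.1 < x.1
      · rw [if_pos hc] at hkept
        refine ⟨pvLe_trans hkept ?_, hkept⟩
        exact Or.inl hc
      · rw [if_neg hc] at hkept
        refine ⟨hkept, pvLe_trans hkept ?_⟩
        obtain ⟨x1, x2, x3⟩ := x; obtain ⟨y1, y2, y3⟩ := y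
        simp only [pvScan, pvLe] at *
        omega
    rcases List.mem_cons.mp hz with h | h
    · subst h; exact hdrop.1
    rcases List.mem_cons.mp h with h | h
    · subst h; exact hdrop.2
    · rw [hstep]; exact ih _ hp' z (by simp [h])

-- membership characterisations of the two candidate lists
theorem pv_mem_cands {t : Int} {c : Int × Int × Int} :
    c ∈ pvCands t ↔ ∃ a b : Int, (1 ≤ a ∧ a < 25) ∧ (1 ≤ b ∧ b < 25) ∧
      c = (a + b + 6 + |t - a * b|, a, b) := by
  simp only [pvCands, List.mem_flatMap, List.mem_map, PySem.List.mem_pyRange_one]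
  constructor
  · rintro ⟨a, ha, b, hb, rfl⟩; exact ⟨a, b, ha, hb, rfl⟩
  · rintro ⟨a, b, ha, hb, rfl⟩; exact ⟨a, ha, b, hb, rfl⟩

theorem pv_mem_candsB {t : Int} {c : Int × Int × Int} :
    c ∈ pvCandsB t ↔ ∃ a b0 : Int, (1 ≤ a ∧ a < 25) ∧
      (b0 = 1 ∨ b0 = PySem.Int.floordiv t a ∨ b0 = PySem.Int.floordiv t a + 1) ∧
      c = (a + min 24 (max 1 b0) + 6 + |t - a * min 24 (max 1 b0)|, a, min 24 (max 1 b0)) := by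
  simp only [pvCandsB, List.mem_flatMap, List.mem_map, PySem.List.mem_pyRange_one,
    List.mem_cons, List.not_mem_nil, or_false]
  constructor
  · rintro ⟨a, ha, b0, hb0, rfl⟩; exact ⟨a, b0, ha, hb0, rfl⟩
  · rintro ⟨a, b0, ha, hb0, rfl⟩; exact ⟨a, ha, b0, hb0, rfl⟩

theorem pv_candsB_subset {t : Int} {c : Int × Int × Int} (h : c ∈ pvCandsB t) :
    c ∈ pvCands t := by
  rcases pv_mem_candsB.mp h with ⟨a, b0, ha, _, rfl⟩
  exact pv_mem_cands.mpr ⟨a, min 24 (max 1 b0), ha, by omega, rfl⟩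

-- the full grid is scanned in strict (a, b)-lexicographic order
theorem pv_pairwise_cands (t : Int) : (pvCands t).Pairwise pvScan := by
  have hrange : (PySem.List.pyRange 1 25).Pairwise (· < ·) :=
    PySem.List.pairwise_lt_pyRange_one 1 25
  unfold pvCands
  rw [List.flatMap_def, List.pairwise_flatten]
  refine ⟨?_, ?_⟩
  · intro l' hl'
    rcases List.mem_map.mp hl' with ⟨a, _, rfl⟩
    exact (List.pairwise_map).mpr (hrange.imp (fun {x y} h => Or.inr ⟨rfl, h⟩))
  · rw [List.pairwise_map]
    refine hrange.imp (fun {a a'} h => ?_)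
    intro x hx y hy
    rcases List.mem_map.mp hx with ⟨b, _, rfl⟩
    rcases List.mem_map.mp hy with ⟨b', _, rfl⟩
    exact Or.inl h

-- per-a domination: some restricted candidate is lex-≤ every full-grid candidate
theorem pv_dominate {t : Int} (ht : 0 ≤ t) :
    ∀ c ∈ pvCands t, ∃ c' ∈ pvCandsB t, pvLe c' c := by
  intro c hc
  rcases pv_mem_cands.mp hc with ⟨a, b, ha, hb, rfl⟩
  obtain ⟨q, hqdef⟩ : ∃ q, PySem.Int.floordiv t a = q := ⟨_, rfl⟩
  have hq : q * a ≤ t ∧ t < (q + 1) * a :=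
    (PySem.Int.floordiv_eq_iff_of_pos (by omega)).mp hqdef
  have hqa : q * a = a * q := mul_comm q a
  have hqa1 : (q + 1) * a = a * q + a := by ring
  have hq0 : 0 ≤ q := by nlinarith [hq.1, hq.2]
  by_cases hcase : b ≤ q
  · -- a*b ≤ a*q ≤ t : the cost a + b + 6 + (t - a*b) is nonincreasing in b
    have hab : a * b ≤ a * q := mul_le_mul_of_nonneg_left hcase (by omega)
    have habs : |t - a * b| = t - a * b := abs_of_nonneg (by omega)
    by_cases ha1 : a = 1
    · -- plateau: candidate b0 = 1 has the same cost and the least b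
      refine ⟨_, pv_mem_candsB.mpr ⟨a, 1, ha, Or.inl rfl, rfl⟩, ?_⟩
      have hm : min 24 (max 1 (1 : Int)) = 1 := by omega
      rw [hm]
      have hab1 : a * 1 = a := mul_one a
      have hab1' : a * 1 ≤ a * b := mul_le_mul_of_nonneg_left (by omega) (by omega)
      have habs1 : |t - a * 1| = t - a * 1 := abs_of_nonneg (by omega)
      apply pvLe_mk
      subst ha1
      omega
    · -- a ≥ 2: strictly decreasing up to q; candidate b0 = q (clamped to 24)
      refine ⟨_, pv_mem_candsB.mpr ⟨a, q, ha, Or.inr (Or.inl hqdef.symm), rfl⟩, ?_⟩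
      have hm : max 1 q = q := by omega
      rw [hm]
      obtain ⟨b', hb'⟩ : ∃ b', b' = min 24 q := ⟨_, rfl⟩
      rw [← hb']
      have hbb' : b ≤ b' ∧ b' ≤ q := by omega
      have hab' : a * b' ≤ a * q := mul_le_mul_of_nonneg_left hbb'.2 (by omega)
      have habs' : |t - a * b'| = t - a * b' := abs_of_nonneg (by omega)
      have hK : a * (b' - b) = a * b' - a * b := by ring
      have hK2 : 2 * (b' - b) ≤ a * (b' - b) :=
        mul_le_mul_of_nonneg_right (by omega) (by omega)
      have hK3 : a * (b' - b) ≤ 24 * (b' - b) :=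
        mul_le_mul_of_nonneg_right (by omega) (by omega)
      apply pvLe_mk
      omega
  · -- b ≥ q + 1 : a*b > t : the cost a + b + 6 + (a*b - t) is increasing in b
    refine ⟨_, pv_mem_candsB.mpr ⟨a, q + 1, ha, Or.inr (Or.inr (by rw [hqdef])), rfl⟩, ?_⟩
    have hm : min 24 (max 1 (q + 1)) = q + 1 := by omega
    rw [hm]
    have hP : a * (q + 1) ≤ a * b := mul_le_mul_of_nonneg_left (by omega) (by omega)
    have hEq : a * (q + 1) = a * q + a := by ring
    have habs : |t - a * b| = -(t - a * b) := abs_of_nonpos (by omega)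
    have habs' : |t - a * (q + 1)| = -(t - a * (q + 1)) := abs_of_nonpos (by omega)
    have hK : a * (b - (q + 1)) = a * b - a * (q + 1) := by ring
    have hK2 : 1 * (b - (q + 1)) ≤ a * (b - (q + 1)) :=
      mul_le_mul_of_nonneg_right (by omega) (by omega)
    have hK3 : a * (b - (q + 1)) ≤ 24 * (b - (q + 1)) :=
      mul_le_mul_of_nonneg_right (by omega) (by omega)
    apply pvLe_mk
    omega

theorem pv_cands_ne_nil (t : Int) : pvCands t ≠ [] := by
  intro h
  have : (1 + 1 + 6 + |t - 1 * 1|, (1 : Int), (1 : Int)) ∈ pvCands t :=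
    pv_mem_cands.mpr ⟨1, 1, by omega, by omega, rfl⟩
  rw [h] at this; exact List.not_mem_nil this

theorem pv_candsB_ne_nil (t : Int) : pvCandsB t ≠ [] := by
  intro h
  have : (1 + min 24 (max 1 (1:Int)) + 6 + |t - 1 * min 24 (max 1 (1:Int))|, (1 : Int),
      min 24 (max 1 (1:Int))) ∈ pvCandsB t :=
    pv_mem_candsB.mpr ⟨1, 1, by omega, Or.inl rfl, rfl⟩
  rw [h] at this; exact List.not_mem_nil this

-- pulling the seed out of A's strict-< running fold
theorem pv_fold1_seed (t : List (Int × Int × Int)) (h x : Int × Int × Int) :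
    (h :: t).foldl (fun m y => if y.1 < m.1 then y else m) x
      = if (t.foldl (fun m y => if y.1 < m.1 then y else m) h).1 < x.1
        then t.foldl (fun m y => if y.1 < m.1 then y else m) h else x := by
  induction t generalizing h x with
  | nil => simp [List.foldl]
  | cons h' t' ih =>
    have l1 : ((h :: h' :: t').foldl (fun m y => if y.1 < m.1 then y else m) x)
        = (h' :: t').foldl (fun m y => if y.1 < m.1 then y else m) (if h.1 < x.1 then h else x) := by
      simp only [List.foldl]
    rw [l1, ih, ih h' h]
    split_ifs <;> first | rfl | omega

-- the two searches return the same triple for every nonnegative target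
theorem pv_best_eq (t : Int) (ht : 0 ≤ t) : pvABest t = pvBestB t := by
  obtain ⟨h, tl, hfull⟩ := List.exists_cons_of_ne_nil (pv_cands_ne_nil t)
  obtain ⟨h', tl', hrestr⟩ := List.exists_cons_of_ne_nil (pv_candsB_ne_nil t)
  -- the two inner minima coincide
  have hM : pvFoldC tl h = pvFoldL tl' h' := by
    have hMmem : pvFoldC tl h ∈ pvCands t := by rw [hfull]; exact pvFoldC_mem tl h
    have hM'mem : pvFoldL tl' h' ∈ pvCands t :=
      pv_candsB_subset (by rw [hrestr]; exact pvFoldL_mem tl' h')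
    have hMle : ∀ z ∈ pvCands t, pvLe (pvFoldC tl h) z := by
      rw [hfull]; exact pvFoldC_le tl h (hfull ▸ pv_pairwise_cands t)
    have hM'le : ∀ z ∈ pvCands t, pvLe (pvFoldL tl' h') z := by
      intro z hz
      rcases pv_dominate ht z hz with ⟨c', hc', hle⟩
      refine pvLe_trans ?_ hle
      rw [hrestr] at hc'
      exact pvFoldL_le tl' h' c' hc'
    exact pvLe_antisymm (hMle _ hM'mem) (hM'le _ hMmem)
  -- rewrite A into seed-factored form
  have hA : pvABest t
      = (if (pvFoldC tl h).1 < t + 10 then pvFoldC tl h else (t + 10, t, 1)) := by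
    have h1 : pvABest t = (pvCands t).foldl (fun m y => if y.1 < m.1 then y else m) (t + 10, t, 1) := by
      unfold pvABest pvCands
      rw [List.foldl_flatMap]
      simp only [List.foldl_map]
    rw [h1, hfull, pv_fold1_seed]
    rfl
  rw [hA, hM]
  unfold pvBestB
  rw [hrestr]
  rfl

-- the pieces A appends for one character, as a function of (target, current, at_cell1)
def pvASeg (t cur : Int) (at1 : Bool) : List (List Char) :=
  let diff := t - cur
  let adjust_cost : Int := |diff| + (if !at1 then 1 else 0)
  let best := pvABest t
  let rebuild_cost := best.1 + (if at1 then 4 else 0)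
  (if adjust_cost ≤ rebuild_cost then
    (if !at1 then [['>']] else []) ++
      [if diff > 0 then List.replicate diff.toNat '+' else List.replicate (-diff).toNat '-']
  else
    let rem := t - best.2.1 * best.2.2
    (if at1 then [['[', '-', ']', '<']] else []) ++
      [List.replicate best.2.1.toNat '+'] ++
      [['[', '>'] ++ List.replicate best.2.2.toNat '+' ++ ['<', '-', ']', '>']] ++
      [if rem > 0 then List.replicate rem.toNat '+' else List.replicate (-rem).toNat '-'])
    ++ [['.']]

theorem pv_step (res : List (List Char)) (cur : Int) (at1 : Bool) (ch : Char) :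
    pvAStep (res, cur, at1) ch = (res ++ pvASeg (ch.toNat : Int) cur at1, (ch.toNat : Int), true) := by
  unfold pvAStep pvASeg
  cases at1 <;> simp only [Bool.not_false, Bool.not_true, if_true] <;>
    split_ifs <;> simp

-- A's one-character pieces flatten to B's piece (targets are character codes, hence ≥ 0)
theorem pv_seg_flatten (t cur : Int) (at1 : Bool) (ht : 0 ≤ t) :
    (pvASeg t cur at1).flatten = pvPiece t cur (!at1) := by
  simp only [pvASeg, pvPiece, pv_best_eq t ht, pv_rep]
  cases at1 <;>
    simp only [Bool.not_false, Bool.not_true, if_true] <;>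
    split_ifs <;>
    simp_all

-- all pieces appended by A's loop over the remaining characters (at_cell1 already true)
def pvChain (cur : Int) : List Char → List (List Char)
  | [] => []
  | c :: cs => pvASeg (c.toNat : Int) cur true ++ pvChain (c.toNat : Int) cs

def pvLast (cur : Int) : List Char → Int
  | [] => cur
  | c :: cs => pvLast (c.toNat : Int) cs

theorem pv_fold_chain (l : List Char) (res : List (List Char)) (cur : Int) :
    l.foldl pvAStep (res, cur, true) = (res ++ pvChain cur l, pvLast cur l, true) := by
  induction l generalizing res cur with
  | nil => simp [pvChain, pvLast]
  | cons c cs ih =>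
    simp only [List.foldl, pv_step, pvChain, pvLast, ih, List.append_assoc]

theorem pv_chain_zip (rest : List Char) (p : Char) :
    (pvChain (p.toNat : Int) rest).flatten
      = (((p :: rest).zip rest).map (fun xy => pvPiece (xy.2.toNat : Int) (xy.1.toNat : Int) false)).flatten := by
  induction rest generalizing p with
  | nil => rfl
  | cons r rs ih =>
    simp only [List.zip, List.zipWith, pvChain, List.flatten_append, List.flatten_cons, List.map]
    rw [pv_seg_flatten _ _ _ (by positivity)]
    simp only [Bool.not_true]
    rw [ih r]
    simp [List.zip]

-- ===== VERDICT (by name: the statement is the Claim_ definition above) =====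
set_option maxRecDepth 100000 in
theorem build_from_spec : Claim_equal_build_from := by
  intro s sv _dom
  unfold Spec_build_from build_from build_from_alt
  cases hl : s.toList with
  | nil => rfl
  | cons c rest =>
    rw [List.foldl_cons, pv_step, pv_fold_chain]
    simp only [List.nil_append, if_true]
    rw [pv_join_nil_flatten, pv_join_nil_flatten]
    simp only [List.flatten_append, List.flatten_cons]
    rw [pv_seg_flatten _ _ _ (by positivity), pv_chain_zip rest c]
    simp
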